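-- pv_equiv track=rewrite | github.com/Torfab/adventOfCodeAndOtherEvents | utilities.py | homeMadeCombinations
-- ===== SOURCE A (Python) =====
-- def homeMadeCombinations(elements, slots):
--   """
--   elements: dict
--     elements are in the form {"a":3, "b":5}
--   slots: int
--     slots are the length of the word of the combination
--   """
--   results = []
--   items = list(elements.items())
--
--   def backtrack(start, path, remaining):
--       if len(path) == slots:
--           results.append(path[:])
--           return
--       if remaining == 0:
--           return
--
--       for i in range(start, len(items)):
--           elem, count = items[i]
--           if count > 0:
--               items[i] = (elem, count - 1)
--               path.append(elem)
--               backtrack(i, path, remaining - 1)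
--               path.pop()
--               items[i] = (elem, count)
--
--   backtrack(0, [], slots)
--   return results
-- ===== SOURCE B (Python) =====
-- def homeMadeCombinations(elements, slots):
--     """Recurse over the distinct elements, choosing how many copies of each
--     to use (descending, so output order matches index-lexicographic order),
--     instead of backtracking one slot at a time."""
--     items = list(elements.items())
--
--     def go(i, remaining):
--         if i == len(items):
--             return [[]] if remaining == 0 else []
--         elem, count = items[i]
--         out = []
--         use = max(0, min(count, remaining))
--         while use >= 0:
--             for tail in go(i + 1, remaining - use):
--                 out.append([elem] * use + tail)
--             use -= 1
--         return out
--
--     return go(0, slots)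
-- ===== Notes on version B (the rewrite author's own statement) =====
-- stated objective: alternative
-- what changed: B recurses over the distinct elements, choosing a multiplicity (descending from min(count, remaining)) for each element at once, instead of A's slot-by-slot backtracking that mutates a shared counts list; recursion depth becomes the number of distinct elements rather than slots.
import Mathlib
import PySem

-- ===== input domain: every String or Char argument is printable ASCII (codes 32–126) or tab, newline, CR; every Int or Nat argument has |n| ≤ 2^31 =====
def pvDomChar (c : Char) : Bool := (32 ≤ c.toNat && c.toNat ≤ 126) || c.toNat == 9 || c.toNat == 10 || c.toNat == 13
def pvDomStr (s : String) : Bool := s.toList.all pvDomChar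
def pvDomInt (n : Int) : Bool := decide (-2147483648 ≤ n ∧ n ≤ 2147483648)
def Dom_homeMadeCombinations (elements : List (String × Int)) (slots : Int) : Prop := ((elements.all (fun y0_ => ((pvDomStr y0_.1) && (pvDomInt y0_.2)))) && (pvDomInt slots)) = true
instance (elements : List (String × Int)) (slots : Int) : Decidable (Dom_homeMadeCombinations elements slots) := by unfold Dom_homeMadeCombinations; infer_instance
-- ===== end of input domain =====

-- B recurses over the distinct elements choosing a multiplicity per element (descending),
-- instead of A's slot-by-slot backtracking; objective: alternative decomposition, same results.


-- ===== PORT A =====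
-- total count of remaining copies; only used for termination of the backtracking recursion
def pvSumCnt (items : List (String × Int)) : Nat := (items.map (fun p => p.2.toNat)).sum

theorem pvSumCnt_set_lt (items : List (String × Int)) (i : Nat) (h : i < items.length)
    (hc : 0 < items[i].2) :
    pvSumCnt (items.set i (items[i].1, items[i].2 - 1)) < pvSumCnt items := by
  induction items generalizing i with
  | nil => simp at h
  | cons p rest ih =>
    cases i with
    | zero => simp [pvSumCnt] at hc ⊢; omega
    | succ j =>
      simp only [List.length_cons, Nat.succ_lt_succ_iff] at h
      simp only [List.getElem_cons_succ] at hc ⊢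
      have := ih j h hc
      simp only [pvSumCnt, List.set_cons_succ, List.map_cons, List.sum_cons] at this ⊢
      omega

-- backtrack(start, path, remaining) of A; btALoop is A's `for i in range(start, len(items))`
mutual
def btA (slots : Int) (items : List (String × Int)) (start : Nat) (path : List String)
    (remaining : Int) : List (List String) :=
  if (path.length : Int) = slots then [path]
  else if remaining = 0 then []
  else btALoop slots items start path remaining
termination_by pvSumCnt items * (items.length + 1) + (items.length - start) + 1
decreasing_by omega
def btALoop (slots : Int) (items : List (String × Int)) (i : Nat) (path : List String)
    (remaining : Int) : List (List String) :=
  if h : i < items.length then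
    (if 0 < items[i].2 then
        btA slots (items.set i (items[i].1, items[i].2 - 1)) i (path ++ [items[i].1]) (remaining - 1)
      else []) ++
    btALoop slots items (i + 1) path remaining
  else []
termination_by pvSumCnt items * (items.length + 1) + (items.length - i)
decreasing_by
  · have h1 := pvSumCnt_set_lt items i h (by assumption)
    have h2 : (items.set i (items[i].1, items[i].2 - 1)).length = items.length := by simp
    rw [h2]
    nlinarith [Nat.sub_le items.length i, h1]
  · omega
end

def homeMadeCombinations (elements : List (String × Int)) (slots : Int) : List (List String) :=
  btA slots (PySem.Dict.ofList elements).items 0 [] slots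

-- ===== PORT B =====
-- go(i, remaining) of B, structurally on items[i:]; btBLoop is B's `while use >= 0`
mutual
def btB : List (String × Int) → Int → List (List String)
  | [], remaining => if remaining = 0 then [[]] else []
  | (e, c) :: rest, remaining => btBLoop e rest remaining (max 0 (min c remaining))
termination_by xs _ => (xs.length, 0)
decreasing_by exact Prod.Lex.left _ _ (by simp)
def btBLoop (e : String) (rest : List (String × Int)) (remaining : Int) (use : Int) :
    List (List String) :=
  if 0 ≤ use then
    ((btB rest (remaining - use)).map (fun tail => List.replicate use.toNat e ++ tail)) ++
      btBLoop e rest remaining (use - 1)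
  else []
termination_by (rest.length, (use + 1).toNat)
decreasing_by
  · omega
  · omega
end

def homeMadeCombinations_alt (elements : List (String × Int)) (slots : Int) : List (List String) :=
  btB (PySem.Dict.ofList elements).items slots

-- ===== PRECONDITION & SPEC =====
def Spec_homeMadeCombinations (elements : List (String × Int)) (slots : Int) (out : List (List String)) : Prop := out = homeMadeCombinations_alt elements slots
instance (elements : List (String × Int)) (slots : Int) (out : List (List String)) : Decidable (Spec_homeMadeCombinations elements slots out) := by unfold Spec_homeMadeCombinations; infer_instance

-- ===== CLAIM (what is proved, stated in full; the proofs are below) =====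
def Claim_equal_homeMadeCombinations : Prop := ∀ (elements : List (String × Int)) (slots : Int), Dom_homeMadeCombinations elements slots → Spec_homeMadeCombinations elements slots (homeMadeCombinations elements slots)

-- ===== LEMMAS AND PROOFS =====

theorem drop_set_self {α : Type} (l : List α) (i : Nat) (a : α) (h : i < l.length) :
    (l.set i a).drop i = a :: l.drop (i + 1) := by
  rw [List.drop_set, if_neg (lt_irrefl i), (List.getElem_cons_drop h).symm, Nat.sub_self,
    List.set_cons_zero]

theorem btBLoop_of_neg (e : String) (rest : List (String × Int)) (r u : Int) (hu : u < 0) :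
    btBLoop e rest r u = [] := by
  rw [btBLoop, if_neg (by omega)]

theorem btBLoop_of_nonneg (e : String) (rest : List (String × Int)) (r u : Int) (hu : 0 ≤ u) :
    btBLoop e rest r u =
      ((btB rest (r - u)).map (fun tail => List.replicate u.toNat e ++ tail)) ++
        btBLoop e rest r (u - 1) := by
  rw [btBLoop, if_pos hu]

theorem btB_zero (xs : List (String × Int)) : btB xs 0 = [[]] := by
  induction xs with
  | nil => rw [btB]; rfl
  | cons p rest ih =>
    obtain ⟨e, c⟩ := p
    rw [btB]
    have hm : max 0 (min c 0) = 0 := by omega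
    rw [hm, btBLoop_of_nonneg _ _ _ _ le_rfl, btBLoop_of_neg _ _ _ _ (by omega)]
    simp [ih]

theorem btB_neg (xs : List (String × Int)) (r : Int) (hr : r < 0) : btB xs r = [] := by
  induction xs with
  | nil => rw [btB, if_neg (by omega)]
  | cons p rest ih =>
    obtain ⟨e, c⟩ := p
    rw [btB]
    have hm : max 0 (min c r) = 0 := by omega
    rw [hm, btBLoop_of_nonneg _ _ _ _ le_rfl, btBLoop_of_neg _ _ _ _ (by omega)]
    simp [ih]

theorem btBLoop_shift (e : String) (rest : List (String × Int)) (r : Int) (n : Nat) :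
    btBLoop e rest r ((n : Int) + 1) =
      (btBLoop e rest (r - 1) (n : Int)).map (fun t => e :: t) ++ btB rest r := by
  induction n generalizing r with
  | zero =>
    simp only [Nat.cast_zero, zero_add]
    rw [btBLoop_of_nonneg e rest r 1 (by omega), show (1 : Int) - 1 = 0 by ring,
      btBLoop_of_nonneg e rest r 0 le_rfl, show (0 : Int) - 1 = -1 by ring,
      btBLoop_of_neg e rest r (-1) (by omega),
      btBLoop_of_nonneg e rest (r - 1) 0 le_rfl, show (0 : Int) - 1 = -1 by ring,
      btBLoop_of_neg e rest (r - 1) (-1) (by omega)]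
    simp
  | succ n ih =>
    rw [btBLoop_of_nonneg _ _ _ _ (by push_cast; omega),
      show ((n + 1 : Nat) : Int) + 1 - 1 = (n : Int) + 1 by push_cast; ring, ih,
      btBLoop_of_nonneg _ _ (r - 1) ((n + 1 : Nat) : Int) (by positivity),
      show ((n + 1 : Nat) : Int) - 1 = (n : Int) by push_cast; ring]
    rw [show (((n + 1 : Nat) : Int) + 1).toNat = n + 2 by omega,
      show (((n + 1 : Nat) : Int)).toNat = n + 1 by omega,
      show r - (((n + 1 : Nat) : Int) + 1) = r - 1 - ((n + 1 : Nat) : Int) by ring]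
    simp [List.map_append, List.map_map, Function.comp, List.append_assoc, List.replicate_succ]

theorem btB_cons_shift (e : String) (c : Int) (rest : List (String × Int)) (r : Int) :
    btB ((e, c) :: rest) r =
      (if 0 < c ∧ 0 < r then (btB ((e, c - 1) :: rest) (r - 1)).map (fun t => e :: t) else []) ++
        btB rest r := by
  rw [btB, btB]
  by_cases h : 0 < c ∧ 0 < r
  · have hm : max 0 (min c r) = min c r := by omega
    have hm2 : max 0 (min (c - 1) (r - 1)) = min c r - 1 := by omega
    obtain ⟨n, hn⟩ : ∃ n : Nat, min c r - 1 = (n : Int) := ⟨(min c r - 1).toNat, by omega⟩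
    rw [if_pos h, hm2, hn, hm, show min c r = (n : Int) + 1 by omega, btBLoop_shift]
  · have hm : max 0 (min c r) = 0 := by omega
    rw [if_neg h, hm, btBLoop_of_nonneg _ _ _ _ le_rfl, btBLoop_of_neg _ _ _ _ (by omega)]
    simp

theorem btALoop_eq (N : Nat) (slots : Int) (items : List (String × Int)) (i : Nat)
    (path : List String) (remaining : Int)
    (hN : pvSumCnt items * (items.length + 1) + (items.length - i) ≤ N)
    (hinv : remaining = slots - path.length) (hne : remaining ≠ 0) :
    btALoop slots items i path remaining =
      (btB (items.drop i) remaining).map (fun t => path ++ t) := by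
  induction N using Nat.strong_induction_on generalizing items i path remaining with
  | _ N IH =>
  rw [btALoop]
  by_cases h : i < items.length
  · rw [dif_pos h]
    have htail : btALoop slots items (i + 1) path remaining =
        (btB (items.drop (i + 1)) remaining).map (fun t => path ++ t) := by
      have hm : pvSumCnt items * (items.length + 1) + (items.length - (i + 1)) < N := by
        generalize pvSumCnt items * (items.length + 1) = a at hN ⊢
        omega
      exact IH _ hm items (i + 1) path remaining le_rfl hinv hne
    rw [htail, ← List.getElem_cons_drop h,
      show items[i] = (items[i].1, items[i].2) from rfl, btB_cons_shift,
      List.map_append]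
    congr 1
    by_cases hc : 0 < items[i].2
    · rw [if_pos hc, btA]
      have hS := pvSumCnt_set_lt items i h hc
      have hlen : (items.set i (items[i].1, items[i].2 - 1)).length = items.length := by simp
      by_cases hs : (((path ++ [items[i].1]).length : Int)) = slots
      · -- remaining = 1 here
        have hr1 : remaining = 1 := by simp at hs; omega
        rw [if_pos hs, if_pos (by omega : 0 < items[i].2 ∧ 0 < remaining), hr1,
          show (1 : Int) - 1 = 0 by ring, btB_zero]
        simp
      · rw [if_neg hs, if_neg (by simp at hs ⊢; omega : ¬ remaining - 1 = 0)]
        have hm' : pvSumCnt (items.set i (items[i].1, items[i].2 - 1)) * (items.length + 1) +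
            (items.length - i) < N := by
          have h1 : pvSumCnt (items.set i (items[i].1, items[i].2 - 1)) * (items.length + 1) +
              (items.length + 1) ≤ pvSumCnt items * (items.length + 1) := by
            nlinarith [hS]
          generalize pvSumCnt (items.set i (items[i].1, items[i].2 - 1)) * (items.length + 1) = a
            at h1 ⊢
          generalize pvSumCnt items * (items.length + 1) = b at h1 hN
          omega
        rw [IH _ hm' _ i (path ++ [items[i].1]) (remaining - 1) (by rw [hlen]) (by simp; omega)
            (by simp at hs ⊢; omega), drop_set_self _ _ _ h]
        by_cases hr : 0 < remaining
        · rw [if_pos ⟨hc, hr⟩]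
          simp [List.map_map, Function.comp]
        · rw [if_neg (by tauto), btB_neg _ _ (by omega)]
          simp
    · rw [if_neg hc, if_neg (by tauto)]
      simp
  · rw [dif_neg h, List.drop_eq_nil_of_le (by omega), btB, if_neg hne]
    simp

theorem btA_eq_btB (N : Nat) (slots : Int) (items : List (String × Int)) (start : Nat)
    (path : List String) (remaining : Int)
    (hN : pvSumCnt items * (items.length + 1) + (items.length - start) ≤ N)
    (hinv : remaining = slots - path.length) :
    btA slots items start path remaining =
      (btB (items.drop start) remaining).map (fun t => path ++ t) := by
  rw [btA]
  by_cases h1 : (path.length : Int) = slots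
  · rw [if_pos h1, show remaining = 0 by omega, btB_zero]
    simp
  · rw [if_neg h1, if_neg (by omega), btALoop_eq N slots items start path remaining hN hinv (by omega)]

-- ===== VERDICT (by name: the statement is the Claim_ definition above) =====
theorem homeMadeCombinations_spec : Claim_equal_homeMadeCombinations := by
  intro elements slots _
  unfold Spec_homeMadeCombinations homeMadeCombinations homeMadeCombinations_alt
  simpa using
    btA_eq_btB
      (pvSumCnt (PySem.Dict.ofList elements).items *
          ((PySem.Dict.ofList elements).items.length + 1) +
        (PySem.Dict.ofList elements).items.length)
      slots (PySem.Dict.ofList elements).items 0 [] slots (by simp) (by simp)
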